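-- pv_equiv track=rewrite | github.com/suzuyu/alred | alred/render.py | render_clab_lines
-- ===== SOURCE A (Python) =====
-- from typing import Any, Callable, Dict, List, Optional
--
-- def render_clab_lines(
--     rendered_links: List[Dict[str, Any]],
--     nodes: Dict[str, Dict[str, Any]],
--     include_nodes: bool,
-- ) -> List[str]:
--     """
--     Render containerlab topology YAML lines.
--
--     Args:
--         rendered_links: Rendered links.
--         nodes: topology.nodes definitions.
--         include_nodes: Whether to include nodes.
--
--     Returns:
--         YAML lines.
--     """
--     lines: List[str] = []
--     lines.append("topology:")
--
--     if include_nodes: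
--         lines.append("  nodes:")
--         for node_name, attrs in nodes.items():
--             lines.append(f"    {node_name}:")
--             lines.append(f'      kind: {attrs["kind"]}')
--             if "mgmt-ipv4" in attrs:
--                 lines.append(f'      mgmt-ipv4: {attrs["mgmt-ipv4"]}')
--             if "group" in attrs:
--                 lines.append(f'      group: {attrs["group"]}')
--         lines.append("")
--
--     lines.append("  links:")
--
--     current_left_node = None
--     for link in rendered_links:
--         ep1, ep2 = link["endpoints"]
--         left_node = ep1.split(":", 1)[0]
--
--         if left_node != current_left_node:
--             if current_left_node is not None:
--                 lines.append("")
--             lines.append(f"    # {left_node}")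
--             current_left_node = left_node
--
--         lines.append(f'    - endpoints: ["{ep1}", "{ep2}"]')
--
--     return lines
-- ===== SOURCE B (Python) =====
-- # Same YAML lines, built by a different decomposition: nodes via a helper +
-- # flat list concatenation, links by first grouping consecutive runs sharing a
-- # left node and then rendering the groups (no current_left_node state machine).
-- from typing import Any, Dict, List
--
--
-- def _node_lines(name: str, attrs: Dict[str, Any]) -> List[str]:
--     out = [f"    {name}:", f'      kind: {attrs["kind"]}']
--     if "mgmt-ipv4" in attrs:
--         out = out + [f'      mgmt-ipv4: {attrs["mgmt-ipv4"]}']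
--     if "group" in attrs:
--         out = out + [f'      group: {attrs["group"]}']
--     return out
--
--
-- def render_clab_lines(
--     rendered_links: List[Dict[str, Any]],
--     nodes: Dict[str, Dict[str, Any]],
--     include_nodes: bool,
-- ) -> List[str]:
--     lines: List[str] = ["topology:"]
--     if include_nodes:
--         lines = lines + ["  nodes:"]
--         for name, attrs in nodes.items():
--             lines = lines + _node_lines(name, attrs)
--         lines = lines + [""]
--     lines = lines + ["  links:"]
--
--     # group consecutive links sharing a left node
--     groups: List[tuple] = []
--     for link in rendered_links:
--         ep1, ep2 = link["endpoints"]
--         left = ep1.split(":", 1)[0]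
--         if groups and groups[-1][0] == left:
--             groups[-1][1].append((ep1, ep2))
--         else:
--             groups.append((left, [(ep1, ep2)]))
--
--     first = True
--     for left, eps in groups:
--         if not first:
--             lines = lines + [""]
--         lines = lines + [f"    # {left}"]
--         lines = lines + [f'    - endpoints: ["{e1}", "{e2}"]' for e1, e2 in eps]
--         first = False
--     return lines
-- ===== Notes on version B (the rewrite author's own statement) =====
-- stated objective: alternative
-- what changed: The links section is produced by first grouping consecutive links that share a left node and then rendering each group (separator, comment header, endpoint lines), replacing A's single-pass current_left_node state machine; the nodes section is emitted via a per-node helper concatenated into the output.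
import Mathlib
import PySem

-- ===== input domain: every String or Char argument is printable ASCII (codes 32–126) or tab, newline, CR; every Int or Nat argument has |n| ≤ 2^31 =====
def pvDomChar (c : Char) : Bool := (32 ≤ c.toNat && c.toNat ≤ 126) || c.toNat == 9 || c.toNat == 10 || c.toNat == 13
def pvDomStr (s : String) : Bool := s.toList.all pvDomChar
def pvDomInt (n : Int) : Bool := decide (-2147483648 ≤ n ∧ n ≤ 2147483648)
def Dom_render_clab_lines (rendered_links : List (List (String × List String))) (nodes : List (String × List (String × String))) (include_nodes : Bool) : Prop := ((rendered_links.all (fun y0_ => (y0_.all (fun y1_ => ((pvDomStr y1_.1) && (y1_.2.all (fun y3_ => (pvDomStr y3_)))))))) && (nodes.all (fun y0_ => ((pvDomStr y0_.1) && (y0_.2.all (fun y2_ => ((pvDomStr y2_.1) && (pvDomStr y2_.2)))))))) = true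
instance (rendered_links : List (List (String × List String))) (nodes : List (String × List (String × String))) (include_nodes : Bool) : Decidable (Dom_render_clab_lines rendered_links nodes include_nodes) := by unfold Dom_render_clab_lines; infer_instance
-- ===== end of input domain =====

-- B builds the links section by grouping consecutive links sharing a left node and then
-- rendering the groups, instead of A's current_left_node state machine; same lines proved equal.

-- ===== PORT A =====
-- ep1.split(":", 1)[0] (sep nonempty, result nonempty: the defaults are never used)
def leftOfA (ep : String) : String :=
  (((PySem.Str.splitMax? ep ":" 1).getD []).getD 0 "")

-- 'lines' is threaded through the appends directly: "topology:", optional nodes block + "",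
-- "  links:", then the link loop over the state (lines, current_left_node).
def render_clab_lines (rendered_links : List (List (String × List String))) (nodes : List (String × List (String × String))) (include_nodes : Bool) : List String :=
  (rendered_links.foldl (fun (st : List String × Option String) link =>
      match List.lookup "endpoints" link with
      | some [ep1, ep2] =>
        let left := leftOfA ep1
        let st := if some left ≠ st.2 then
            ((if st.2.isSome then st.1 ++ [""] else st.1) ++ ["    # " ++ left], some left)
          else st
        (st.1 ++ ["    - endpoints: [\"" ++ ep1 ++ "\", \"" ++ ep2 ++ "\"]"], st.2)
      | _ => st)   -- KeyError / unpack error: excluded by Pre_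
    ((if include_nodes then
        (nodes.foldl (fun acc p =>
          let acc := acc ++ ["    " ++ p.1 ++ ":"]
          let acc := acc ++ ["      kind: " ++ (List.lookup "kind" p.2).getD ""]
          let acc := if (List.lookup "mgmt-ipv4" p.2).isSome then acc ++ ["      mgmt-ipv4: " ++ (List.lookup "mgmt-ipv4" p.2).getD ""] else acc
          if (List.lookup "group" p.2).isSome then acc ++ ["      group: " ++ (List.lookup "group" p.2).getD ""] else acc)
          ["topology:", "  nodes:"]) ++ [""]
      else ["topology:"]) ++ ["  links:"], (none : Option String))).1

-- ===== PORT B =====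
-- ep1.split(":", 1)[0] again (B's own copy of the helper)
def leftOfB (ep : String) : String :=
  (((PySem.Str.splitMax? ep ":" 1).getD []).getD 0 "")

def nodeLines (p : String × List (String × String)) : List String :=
  let out := ["    " ++ p.1 ++ ":", "      kind: " ++ (List.lookup "kind" p.2).getD ""]
  let out := if (List.lookup "mgmt-ipv4" p.2).isSome then out ++ ["      mgmt-ipv4: " ++ (List.lookup "mgmt-ipv4" p.2).getD ""] else out
  if (List.lookup "group" p.2).isSome then out ++ ["      group: " ++ (List.lookup "group" p.2).getD ""] else out

-- groups[-1] extension / append of a new group, by recursion to the last element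
def addLink : List (String × List (String × String)) → String → String × String → List (String × List (String × String))
  | [], left, e => [(left, [e])]
  | [g], left, e => if g.1 == left then [(g.1, g.2 ++ [e])] else [g, (left, [e])]
  | g :: g' :: gs, left, e => g :: addLink (g' :: gs) left e

def render_clab_lines_alt (rendered_links : List (List (String × List String))) (nodes : List (String × List (String × String))) (include_nodes : Bool) : List String :=
  ((rendered_links.foldl (fun gs link =>
      match List.lookup "endpoints" link with
      | some eps =>
        -- length-2 guard totalizes the unpacking 'ep1, ep2 = eps' (other shapes: outside Pre_)
        if eps.length == 2 then addLink gs (leftOfB (eps.getD 0 "")) (eps.getD 0 "", eps.getD 1 "")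
        else gs
      | none => gs) []).foldl
    (fun (st : List String × Bool) g =>
      ((if st.2 then st.1 else st.1 ++ [""]) ++ ["    # " ++ g.1]
        ++ g.2.map (fun e => "    - endpoints: [\"" ++ e.1 ++ "\", \"" ++ e.2 ++ "\"]"), false))
    ((if include_nodes then ["topology:"] ++ ["  nodes:"] ++ nodes.flatMap nodeLines ++ [""]
      else ["topology:"]) ++ ["  links:"], true)).1

-- ===== PRECONDITION & SPEC =====
-- Pre_ excludes exactly the inputs where A raises: a link without an "endpoints" key or whose
-- endpoints list does not have exactly two entries (KeyError/ValueError), and, when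
-- include_nodes, a node without a "kind" attribute (KeyError).
def Pre_render_clab_lines (rendered_links : List (List (String × List String))) (nodes : List (String × List (String × String))) (include_nodes : Bool) : Prop :=
  (rendered_links.all (fun link =>
      (List.lookup "endpoints" link).map List.length == some 2)
    && (!include_nodes || nodes.all (fun p => (List.lookup "kind" p.2).isSome))) = true
instance (rendered_links : List (List (String × List String))) (nodes : List (String × List (String × String))) (include_nodes : Bool) : Decidable (Pre_render_clab_lines rendered_links nodes include_nodes) := by unfold Pre_render_clab_lines; infer_instance

def pvWitness_render_clab_lines : (List (List (String × List String))) × (List (String × List (String × String))) × Bool :=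
  ([[("endpoints", ["s1:eth0", "s2:eth0"])], [("endpoints", ["s1:eth1", "s3:eth0"])]],
   [("s1", [("kind", "linux"), ("group", "core")]), ("s2", [("kind", "srl")])],
   true)

def Spec_render_clab_lines (rendered_links : List (List (String × List String))) (nodes : List (String × List (String × String))) (include_nodes : Bool) (out : List String) : Prop := out = render_clab_lines_alt rendered_links nodes include_nodes
instance (rendered_links : List (List (String × List String))) (nodes : List (String × List (String × String))) (include_nodes : Bool) (out : List String) : Decidable (Spec_render_clab_lines rendered_links nodes include_nodes out) := by unfold Spec_render_clab_lines; infer_instance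

-- ===== CLAIM (what is proved, stated in full; the proofs are below) =====
def Claim_equal_render_clab_lines : Prop := ∀ (rendered_links : List (List (String × List String))) (nodes : List (String × List (String × String))) (include_nodes : Bool), Dom_render_clab_lines rendered_links nodes include_nodes → Pre_render_clab_lines rendered_links nodes include_nodes → Spec_render_clab_lines rendered_links nodes include_nodes (render_clab_lines rendered_links nodes include_nodes)

-- ===== LEMMAS AND PROOFS =====

lemma leftOfB_eq (ep : String) : leftOfB ep = leftOfA ep := rfl

-- the lines A's link loop appends after state (·, cur)
def emitA (cur : Option String) : List (List (String × List String)) → List String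
  | [] => []
  | link :: rest =>
    match List.lookup "endpoints" link with
    | some [ep1, ep2] =>
      (if some (leftOfA ep1) ≠ cur then (if cur.isSome then [""] else []) ++ ["    # " ++ leftOfA ep1] else [])
        ++ ["    - endpoints: [\"" ++ ep1 ++ "\", \"" ++ ep2 ++ "\"]"] ++ emitA (some (leftOfA ep1)) rest
    | _ => emitA cur rest

-- the final current_left_node after A's link loop
def lastA (cur : Option String) : List (List (String × List String)) → Option String
  | [] => cur
  | link :: rest =>
    match List.lookup "endpoints" link with
    | some [ep1, _] => lastA (some (leftOfA ep1)) rest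
    | _ => lastA cur rest

-- B's group fold, started on a state whose last group is (l, es)
def FB (l : String) (es : List (String × String)) : List (List (String × List String)) → List (String × List (String × String))
  | [] => [(l, es)]
  | link :: rest =>
    match List.lookup "endpoints" link with
    | some [ep1, ep2] =>
      if l == leftOfA ep1 then FB l (es ++ [(ep1, ep2)]) rest
      else (l, es) :: FB (leftOfA ep1) [(ep1, ep2)] rest
    | _ => FB l es rest

-- B's group fold from the empty state
def GB : List (List (String × List String)) → List (String × List (String × String))
  | [] => []
  | link :: rest =>
    match List.lookup "endpoints" link with
    | some [ep1, ep2] => FB (leftOfA ep1) [(ep1, ep2)] rest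
    | _ => GB rest

lemma foldA_eq (links : List (List (String × List String))) (acc : List String) (cur : Option String) :
    links.foldl (fun (st : List String × Option String) link =>
      match List.lookup "endpoints" link with
      | some [ep1, ep2] =>
        let left := leftOfA ep1
        let st := if some left ≠ st.2 then
            ((if st.2.isSome then st.1 ++ [""] else st.1) ++ ["    # " ++ left], some left)
          else st
        (st.1 ++ ["    - endpoints: [\"" ++ ep1 ++ "\", \"" ++ ep2 ++ "\"]"], st.2)
      | _ => st) (acc, cur)
    = (acc ++ emitA cur links, lastA cur links) := by
  induction links generalizing acc cur with
  | nil => simp [emitA, lastA]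
  | cons link rest ih =>
    rw [List.foldl_cons]
    cases h : List.lookup "endpoints" link with
    | none =>
      simp only [h, emitA, lastA]
      exact ih acc cur
    | some eps =>
      match eps with
      | [] => simp only [h, emitA, lastA]; exact ih acc cur
      | [a] => simp only [h, emitA, lastA]; exact ih acc cur
      | a :: b :: c :: r => simp only [h, emitA, lastA]; exact ih acc cur
      | [ep1, ep2] =>
        by_cases hc : some (leftOfA ep1) ≠ cur
        · simp only [h, emitA, lastA, if_pos hc, ih]
          cases cur <;> simp [List.append_assoc]
        · rw [Ne, not_not] at hc
          subst hc
          simp only [h, emitA, lastA, ne_eq, not_true_eq_false, if_false, ih]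
          simp [List.append_assoc]

-- B's guarded step computes the same case split as the two-pattern match used in the fold lemmas
lemma stepB_red (gs : List (String × List (String × String))) (link : List (String × List String)) :
    (match List.lookup "endpoints" link with
     | some eps =>
       if eps.length == 2 then addLink gs (leftOfA (eps.getD 0 "")) (eps.getD 0 "", eps.getD 1 "")
       else gs
     | none => gs)
    = (match List.lookup "endpoints" link with
       | some [ep1, ep2] => addLink gs (leftOfA ep1) (ep1, ep2)
       | _ => gs) := by
  cases h : List.lookup "endpoints" link with
  | none => rfl
  | some eps =>
    match eps with
    | [] => rfl
    | [a] => rfl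
    | [a, b] => rfl
    | a :: b :: c :: r => rfl

lemma addLink_append (gs : List (String × List (String × String))) (l : String)
    (es : List (String × String)) (left : String) (e : String × String) :
    addLink (gs ++ [(l, es)]) left e
      = if l == left then gs ++ [(l, es ++ [e])] else gs ++ [(l, es), (left, [e])] := by
  induction gs with
  | nil => simp [addLink]
  | cons g gs' ih =>
    cases gs' with
    | nil =>
      simp only [List.cons_append, List.nil_append, addLink]
      split <;> simp
    | cons g' gs'' =>
      simp only [List.cons_append, addLink]
      simp only [List.cons_append] at ih
      rw [ih]
      split <;> simp

lemma foldB_eq (links : List (List (String × List String)))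
    (gs : List (String × List (String × String))) (l : String) (es : List (String × String)) :
    links.foldl (fun gs link =>
        match List.lookup "endpoints" link with
        | some [ep1, ep2] => addLink gs (leftOfA ep1) (ep1, ep2)
        | _ => gs) (gs ++ [(l, es)])
      = gs ++ FB l es links := by
  induction links generalizing gs l es with
  | nil => simp [FB]
  | cons link rest ih =>
    rw [List.foldl_cons]
    cases h : List.lookup "endpoints" link with
    | none => simp only [h, FB]; exact ih gs l es
    | some eps =>
      match eps with
      | [] => simp only [h, FB]; exact ih gs l es
      | [a] => simp only [h, FB]; exact ih gs l es
      | a :: b :: c :: r => simp only [h, FB]; exact ih gs l es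
      | [ep1, ep2] =>
        by_cases hl : l == leftOfA ep1
        · simp only [h, FB, addLink_append, hl, if_true, if_pos]
          exact ih gs l (es ++ [(ep1, ep2)])
        · simp only [h, FB, addLink_append, hl, Bool.false_eq_true, if_false, if_neg]
          have h2 : gs ++ [(l, es), (leftOfA ep1, [(ep1, ep2)])]
              = (gs ++ [(l, es)]) ++ [(leftOfA ep1, [(ep1, ep2)])] := by simp
          rw [h2, ih (gs ++ [(l, es)]) (leftOfA ep1) [(ep1, ep2)]]
          simp

lemma foldB0_eq (links : List (List (String × List String))) :
    links.foldl (fun gs link =>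
        match List.lookup "endpoints" link with
        | some [ep1, ep2] => addLink gs (leftOfA ep1) (ep1, ep2)
        | _ => gs) []
      = GB links := by
  induction links with
  | nil => simp [GB]
  | cons link rest ih =>
    rw [List.foldl_cons]
    cases h : List.lookup "endpoints" link with
    | none => simp only [h, GB]; exact ih
    | some eps =>
      match eps with
      | [] => simp only [h, GB]; exact ih
      | [a] => simp only [h, GB]; exact ih
      | a :: b :: c :: r => simp only [h, GB]; exact ih
      | [ep1, ep2] =>
        simp only [h, GB, addLink]
        exact foldB_eq rest [] (leftOfA ep1) [(ep1, ep2)]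

lemma renderFB_eq (links : List (List (String × List String))) (l : String)
    (es : List (String × String)) (acc : List String) (first : Bool) :
    (FB l es links).foldl (fun (st : List String × Bool) g =>
        ((if st.2 then st.1 else st.1 ++ [""]) ++ ["    # " ++ g.1]
          ++ g.2.map (fun e => "    - endpoints: [\"" ++ e.1 ++ "\", \"" ++ e.2 ++ "\"]"), false))
      (acc, first)
    = (acc ++ (if first then [] else [""]) ++ ["    # " ++ l]
        ++ es.map (fun e => "    - endpoints: [\"" ++ e.1 ++ "\", \"" ++ e.2 ++ "\"]")
        ++ emitA (some l) links, false) := by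
  induction links generalizing l es acc first with
  | nil =>
    simp only [FB, List.foldl_cons, List.foldl_nil, emitA]
    cases first <;> simp [List.append_assoc]
  | cons link rest ih =>
    cases h : List.lookup "endpoints" link with
    | none => simp only [h, FB, emitA]; rw [ih]
    | some eps =>
      match eps with
      | [] => simp only [h, FB, emitA]; rw [ih]
      | [a] => simp only [h, FB, emitA]; rw [ih]
      | a :: b :: c :: r => simp only [h, FB, emitA]; rw [ih]
      | [ep1, ep2] =>
        by_cases hl : l == leftOfA ep1
        · have hl' : leftOfA ep1 = l := (eq_of_beq hl).symm
          simp only [h, FB, emitA, hl, if_true, if_pos]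
          rw [ih]
          simp only [hl', ne_eq, not_true_eq_false, if_false]
          simp [List.append_assoc]
        · have hl' : some (leftOfA ep1) ≠ some l := by
            intro hcontra
            exact hl (beq_iff_eq.mpr (Option.some.inj hcontra).symm)
          simp only [h, FB, emitA, hl, Bool.false_eq_true, if_false, if_neg, List.foldl_cons]
          rw [ih]
          simp only [ne_eq, hl', not_false_eq_true, if_true, if_pos, Option.isSome_some]
          cases first <;> simp [List.append_assoc]

lemma renderGB_eq (links : List (List (String × List String))) (acc : List String) :
    ((GB links).foldl (fun (st : List String × Bool) g =>
        ((if st.2 then st.1 else st.1 ++ [""]) ++ ["    # " ++ g.1]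
          ++ g.2.map (fun e => "    - endpoints: [\"" ++ e.1 ++ "\", \"" ++ e.2 ++ "\"]"), false))
      (acc, true)).1
    = acc ++ emitA none links := by
  induction links with
  | nil => simp [GB, emitA]
  | cons link rest ih =>
    cases h : List.lookup "endpoints" link with
    | none => simp only [h, GB, emitA]; exact ih
    | some eps =>
      match eps with
      | [] => simp only [h, GB, emitA]; exact ih
      | [a] => simp only [h, GB, emitA]; exact ih
      | a :: b :: c :: r => simp only [h, GB, emitA]; exact ih
      | [ep1, ep2] =>
        simp only [h, GB, emitA, renderFB_eq]
        simp [List.append_assoc]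

lemma nodesFold_eq (nodes : List (String × List (String × String))) (acc : List String) :
    nodes.foldl (fun acc p =>
        let acc := acc ++ ["    " ++ p.1 ++ ":"]
        let acc := acc ++ ["      kind: " ++ (List.lookup "kind" p.2).getD ""]
        let acc := if (List.lookup "mgmt-ipv4" p.2).isSome then acc ++ ["      mgmt-ipv4: " ++ (List.lookup "mgmt-ipv4" p.2).getD ""] else acc
        if (List.lookup "group" p.2).isSome then acc ++ ["      group: " ++ (List.lookup "group" p.2).getD ""] else acc) acc
      = acc ++ nodes.flatMap nodeLines := by
  induction nodes generalizing acc with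
  | nil => simp
  | cons p rest ih =>
    rw [List.foldl_cons, List.flatMap_cons, ih]
    simp only [nodeLines]
    split_ifs <;> simp [List.append_assoc]

-- ===== VERDICT (by name: the statement is the Claim_ definition above) =====
theorem render_clab_lines_spec : Claim_equal_render_clab_lines := by
  intro rendered_links nodes include_nodes _ _
  unfold Spec_render_clab_lines render_clab_lines render_clab_lines_alt
  simp only [leftOfB_eq, stepB_red]
  rw [foldA_eq, foldB0_eq, renderGB_eq]
  cases include_nodes with
  | false => simp
  | true =>
    simp only [if_true, if_pos, nodesFold_eq]
    simp [List.append_assoc]
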